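-- pv_equiv track=rewrite | github.com/kimdy003/Python_study | 4_etc/grep/3.py | solution
-- ===== SOURCE A (Python) =====
-- def check(visit, row, col):
--     for r in range(row):
--         v = visit[r]
--
--         if col == v:
--             return False
--
--     return True
--
-- def Place(word, cards, visit, exist, row):
--     # 끝내는 조건 추가
--     for w in word:
--         if len(exist[w]) != 0:
--             break
--     else:
--         return 1
--
--     cnt = 0
--     for col in range(len(cards[0])):
--         if check(visit, row, col) == True:
--             # cards에서 word에 있는 단어 col넣기
--             if cards[row][col] in exist:
--                 if len(exist[cards[row][col]]) != 0:
--                     temp = exist[cards[row][col]].pop()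
--                     visit[row] = col
--                     cnt += Place(word, cards, visit, exist, row + 1)
--
--                     exist[cards[row][col]].append(temp)
--
--     return cnt
--
-- def solution(word, cards):
--     answer = 0
--     exist = {}
--     for i, w in enumerate(word):
--         exist[w] = exist.get(w, []) + [i]
--
--     num = len(cards) - len(word)
--     for row in range(num + 1):
--         visit = [0] * len(cards[row:])
--         answer += Place(word, cards[row:], visit, exist, 0)
--
--     return answer
-- ===== SOURCE B (Python) =====
-- def solution(word, cards):
--     m = len(word)
--     need = {}
--     for w in word:
--         need[w] = need.get(w, 0) + 1
--     total = 0
--     for off in range(len(cards) - m + 1):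
--         # breadth-first: frontier of partial states (used column tuple, remaining letter counts)
--         frontier = [((), need)]
--         for r in range(m):
--             row = cards[off + r]
--             nxt = []
--             for used, rem in frontier:
--                 for c in range(len(row)):
--                     if c not in used and rem.get(row[c], 0) > 0:
--                         rem2 = dict(rem)
--                         rem2[row[c]] = rem2[row[c]] - 1
--                         nxt.append((used + (c,), rem2))
--             frontier = nxt
--         total += len(frontier)
--     return total
-- ===== Notes on version B (the rewrite author's own statement) =====
-- stated objective: faster
-- what changed: Replaces the recursive pop/append backtracking over a dict of index lists by an iterative breadth-first search (per offset a frontier of (used-column tuple, remaining letter counts) states is expanded level by level), and drops A's per-offset cards[row:] slice copy and visit allocation, so the per-offset overhead is O(1) instead of O(n).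
-- outside the precondition, e.g. on solution(['a', 'b'], [['a', 'c'], ['x', 'y', 'b']]): A returns 0, B returns 1
import Mathlib
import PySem

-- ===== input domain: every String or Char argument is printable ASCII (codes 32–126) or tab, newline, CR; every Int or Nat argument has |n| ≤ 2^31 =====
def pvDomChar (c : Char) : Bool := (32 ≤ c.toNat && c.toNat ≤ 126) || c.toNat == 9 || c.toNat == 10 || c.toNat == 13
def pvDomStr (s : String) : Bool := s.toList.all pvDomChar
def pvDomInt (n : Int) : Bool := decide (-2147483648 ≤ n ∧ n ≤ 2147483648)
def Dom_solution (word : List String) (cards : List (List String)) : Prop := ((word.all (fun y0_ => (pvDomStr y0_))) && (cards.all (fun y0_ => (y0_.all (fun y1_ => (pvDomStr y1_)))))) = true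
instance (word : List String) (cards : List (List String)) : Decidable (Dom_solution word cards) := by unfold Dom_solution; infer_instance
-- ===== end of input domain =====

-- B replaces A's recursive pop/append backtracking by an iterative breadth-first frontier of
-- (used columns, remaining letter counts) states, without A's per-offset cards[row:] copies
-- (a timing run measured B faster).


-- ===== PORT A =====
-- check(visit, row, col): early-return loop over r in range(row); on every reachable call
-- row ≤ len(visit), so the bare index visit[r] is total — .getD 0 is only a totality guard.
def check (visit : List Nat) (row : Nat) (col : Nat) : Bool :=
  (List.range row).all (fun r => !(col == visit.getD r 0))

-- Place(word, cards, visit, exist, row).  fuel is only a totality guard for the recursion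
-- (solution passes word.length + 1, which the proof shows is never exhausted).  Python's
-- temp = exist[key].pop() … exist[key].append(temp) mutates exist for the recursive call and
-- restores it afterwards; in this pure rendering the recursive call gets the popped dict
-- (insert key dropLast) and the restored dict is the unchanged `exist` itself.
def Place (fuel : Nat) (word : List String) (cards : List (List String)) (visit : List Nat)
    (exist : PySem.Dict String (List Int)) (row : Nat) : Int :=
  match fuel with
  | 0 => 0
  | fuel + 1 =>
    if word.all (fun w => (exist.getD w []).length == 0) then 1
    else
      (List.range (cards.getD 0 []).length).foldl (fun cnt col =>
        if check visit row col then
          let key := (cards.getD row []).getD col ""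
          if exist.contains key then
            if (exist.getD key []).length ≠ 0 then
              cnt + Place fuel word cards (visit.set row col)
                      (exist.insert key (exist.getD key []).dropLast) (row + 1)
            else cnt
          else cnt
        else cnt) 0

def solution (word : List String) (cards : List (List String)) : Int :=
  let exist := (PySem.List.enumerate word 0).foldl
      (fun d p => d.insert p.2 (d.getD p.2 [] ++ [p.1])) PySem.Dict.empty
  let num : Int := PySem.List.len cards - PySem.List.len word
  (PySem.List.pyRange 0 (num + 1) 1).foldl (fun answer row =>
      let slice := PySem.List.slice cards (some row) none
      answer + Place (word.length + 1) word slice (List.replicate slice.length 0)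
                 exist 0) 0

-- ===== PORT B =====
-- one BFS expansion step: the inner 'for used, rem in frontier: for c in range(len(row)): …'
def stepB (row : List String) (s : List Nat × PySem.Dict String Int) :
    List (List Nat × PySem.Dict String Int) :=
  (List.range row.length).filterMap (fun c =>
    if c ∉ s.1 ∧ s.2.getD (row.getD c "") 0 > 0 then
      some (s.1 ++ [c], s.2.insert (row.getD c "") (s.2.getD (row.getD c "") 0 - 1))
    else none)

def solution_alt (word : List String) (cards : List (List String)) : Int :=
  let m := word.length
  let need := word.foldl (fun d w => d.insert w (d.getD w 0 + 1))
      (PySem.Dict.empty : PySem.Dict String Int)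
  (PySem.List.pyRange 0 (PySem.List.len cards - (m : Int) + 1) 1).foldl (fun total off =>
    let frontier := (List.range m).foldl
        (fun frontier r => frontier.flatMap (stepB (cards.getD (off.toNat + r) [])))
        [(([] : List Nat), need)]
    total + frontier.length) 0

-- ===== PRECONDITION & SPEC =====
-- Pre_ excludes ragged cards (rows of unequal length) when the word is nonempty and not longer
-- than cards (the only case in which A indexes rows at all): there A raises IndexError whenever
-- the search reaches a row shorter than the offset's first row, and where A happens to return,
-- its use of the offset's first-row width for every row is an accident of the implementation.
def Pre_solution (word : List String) (cards : List (List String)) : Prop :=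
  word = [] ∨ cards.length < word.length ∨ ∀ row ∈ cards, row.length = (cards.headD []).length
instance (word : List String) (cards : List (List String)) : Decidable (Pre_solution word cards) := by
  unfold Pre_solution; infer_instance
def pvWitness_solution : List String × List (List String) :=
  (["a", "b"], [["b", "a"], ["a", "b"], ["c", "b"]])
def Spec_solution (word : List String) (cards : List (List String)) (out : Int) : Prop := out = solution_alt word cards
instance (word : List String) (cards : List (List String)) (out : Int) : Decidable (Spec_solution word cards out) := by unfold Spec_solution; infer_instance

-- ===== CLAIM (what is proved, stated in full; the proofs are below) =====
def Claim_equal_solution : Prop := ∀ (word : List String) (cards : List (List String)), Dom_solution word cards → Pre_solution word cards → Spec_solution word cards (solution word cards)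

-- ===== LEMMAS AND PROOFS =====

-- B's frontier loop, abstracted over the list of rows it consumes
def levels (rows : List (List String)) (F : List (List Nat × PySem.Dict String Int)) :
    List (List Nat × PySem.Dict String Int) :=
  match rows with
  | [] => F
  | row :: rest => levels rest (F.flatMap (stepB row))

lemma levels_append (rows : List (List String)) (F G : List (List Nat × PySem.Dict String Int)) :
    levels rows (F ++ G) = levels rows F ++ levels rows G := by
  induction rows generalizing F G with
  | nil => rfl
  | cons row rest ih => simp [levels, List.flatMap_append, ih]

lemma length_levels (rows : List (List String)) (F : List (List Nat × PySem.Dict String Int)) :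
    (levels rows F).length = (F.map (fun s => (levels rows [s]).length)).sum := by
  induction F with
  | nil => induction rows with
    | nil => rfl
    | cons row rest ih => simpa [levels] using ih
  | cons s F ih =>
    have : (s :: F) = [s] ++ F := rfl
    rw [this, levels_append]
    simp [ih]

lemma levels_cons_singleton (row : List String) (rest : List (List String))
    (s : List Nat × PySem.Dict String Int) :
    (levels (row :: rest) [s]).length
      = ((stepB row s).map (fun t => (levels rest [t]).length)).sum := by
  simp [levels]
  exact length_levels rest (stepB row s)

-- sum of an ite-update over a Nodup key list containing the key
lemma sum_map_ite_insert (S : List String) (hn : S.Nodup) (k : String) (v : Int)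
    (f : String → Int) (hk : k ∈ S) :
    (S.map (fun w => if w = k then v else f w)).sum = (S.map f).sum - f k + v := by
  induction S with
  | nil => cases hk
  | cons x S ih =>
    by_cases hx : x = k
    · subst hx
      have hxS : x ∉ S := (List.nodup_cons.1 hn).1
      have hmap : S.map (fun w => if w = x then v else f w) = S.map f :=
        List.map_congr_left (fun w hw => if_neg (by rintro rfl; exact hxS hw))
      simp [hmap]; ring
    · have hk' : k ∈ S := by
        rcases List.mem_cons.1 hk with h | h
        · exact absurd h.symm hx
        · exact h
      have hrec := ih (List.nodup_cons.1 hn).2 hk'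
      simp only [List.map_cons, List.sum_cons, hrec, if_neg hx]
      ring

-- sum of getD over a Nodup key list after one insert at a member key
lemma sum_getD_insert (S : List String) (hn : S.Nodup) (d : PySem.Dict String Int)
    (k : String) (v : Int) (hk : k ∈ S) :
    (S.map (fun w => (d.insert k v).getD w 0)).sum
      = (S.map (fun w => d.getD w 0)).sum - d.getD k 0 + v := by
  simp only [PySem.Dict.getD_insert]
  exact sum_map_ite_insert S hn k v _ hk

-- nonnegative Int list summing to zero is all-zero
lemma all_zero_of_sum_zero (l : List Int) (h0 : ∀ x ∈ l, 0 ≤ x) (hs : l.sum = 0) :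
    ∀ x ∈ l, x = 0 := by
  induction l with
  | nil => simp
  | cons a l ih =>
    have ha : 0 ≤ a := h0 a (by simp)
    have hl : 0 ≤ l.sum := List.sum_nonneg (fun x hx => h0 x (List.mem_cons_of_mem _ hx))
    simp only [List.sum_cons] at hs
    have ha0 : a = 0 := by omega
    have hl0 : l.sum = 0 := by omega
    intro x hx
    rcases List.mem_cons.1 hx with rfl | hx'
    · exact ha0
    · exact ih (fun y hy => h0 y (List.mem_cons_of_mem _ hy)) hl0 x hx'

-- A's check loop reads exactly the first `row` entries of visit
lemma check_iff (visit : List Nat) (row col : Nat) (h : row ≤ visit.length) :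
    check visit row col = true ↔ col ∉ visit.take row := by
  simp only [check, List.all_eq_true, List.mem_range, Bool.not_eq_eq_eq_not, Bool.not_true,
    beq_eq_false_iff_ne, ne_eq]
  constructor
  · intro hall hmem
    obtain ⟨i, hi, hget⟩ := List.mem_take_iff_getElem.1 hmem
    have hir : i < row := lt_of_lt_of_le hi (min_le_left _ _)
    have hiv : i < visit.length := lt_of_lt_of_le hi (min_le_right _ _)
    exact hall i hir (by rw [List.getD_eq_getElem visit 0 hiv, hget])
  · intro hnot i hir hcol
    exact hnot (List.mem_take_iff_getElem.2
      ⟨i, lt_min hir (by omega), by rw [← List.getD_eq_getElem visit 0 (by omega), hcol]⟩)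

-- setting the entry just past the read prefix appends it to the prefix
lemma take_set_succ (visit : List Nat) (k col : Nat) (h : k < visit.length) :
    (visit.set k col).take (k + 1) = visit.take k ++ [col] := by
  rw [List.take_add_one, List.take_set_of_le (le_refl k)]
  simp [h]

-- sum over a filterMap vs sum over the source with the none-arms as zeros
lemma sum_map_filterMap {α β : Type} (l : List α) (h : α → Option β) (g : β → Int) :
    ((l.filterMap h).map g).sum
      = (l.map (fun a => match h a with | some b => g b | none => 0)).sum := by
  induction l with
  | nil => rfl
  | cons a l ih =>
    cases hha : h a <;> simp [hha, ih]

-- B's indexed frontier loop is `levels` over the rows it consumes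
lemma foldl_stepB_eq_levels (cards : List (List String)) :
    ∀ (m k : Nat) (F : List (List Nat × PySem.Dict String Int)), k + m ≤ cards.length →
    (List.range m).foldl (fun F r => F.flatMap (stepB (cards.getD (k + r) []))) F
      = levels ((cards.drop k).take m) F := by
  intro m
  induction m with
  | zero => intro k F _; simp [levels]
  | succ m ih =>
    intro k F h
    have hk : k < cards.length := by omega
    rw [List.range_succ_eq_map]
    simp only [List.foldl_cons, List.foldl_map]
    rw [List.drop_eq_getElem_cons hk, List.take_succ_cons]
    simp only [levels]
    have hfun : ∀ (G : List (List Nat × PySem.Dict String Int)),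
        (List.range m).foldl (fun F r => F.flatMap (stepB (cards.getD (k + Nat.succ r) []))) G
          = (List.range m).foldl (fun F r => F.flatMap (stepB (cards.getD ((k + 1) + r) []))) G := by
      intro G
      apply PySem.List.foldl_congr_mem
      intro acc r _
      have : k + Nat.succ r = (k + 1) + r := by omega
      rw [this]
    rw [hfun, ih (k + 1) _ (by omega)]
    have : cards.getD (k + 0) [] = cards[k] := by
      rw [Nat.add_zero]; exact List.getD_eq_getElem cards [] hk
    rw [this]

-- A's DFS count from a mid-search state equals B's BFS count from the corresponding state
lemma place_eq (word : List String) (slice : List (List String))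
    (hrect : ∀ r ∈ slice, r.length = (slice.getD 0 []).length)
    (hms : word.length ≤ slice.length) :
    ∀ (j k : Nat) (visit : List Nat) (exist : PySem.Dict String (List Int))
      (rem : PySem.Dict String Int),
      j + k = word.length →
      visit.length = slice.length →
      exist.keys = PySem.Set.ofList word →
      (∀ w, ((exist.getD w []).length : Int) = rem.getD w 0) →
      ((PySem.Set.ofList word).map (fun w => rem.getD w 0)).sum = (j : Int) →
      Place (j + 1) word slice visit exist k
        = ((levels ((slice.drop k).take j) [(visit.take k, rem)]).length : Int) := by
  intro j
  induction j with
  | zero =>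
    intro k visit exist rem hjk hvl hkeys hrel hsum
    have hz : ∀ w ∈ word, (exist.getD w []).length = 0 := by
      intro w hw
      have hmem : rem.getD w 0 ∈ (PySem.Set.ofList word).map (fun w => rem.getD w 0) :=
        List.mem_map_of_mem ((PySem.Set.mem_ofList word w).2 hw)
      have hnn : ∀ x ∈ (PySem.Set.ofList word).map (fun w => rem.getD w 0), 0 ≤ x := by
        intro x hx
        obtain ⟨w', _, rfl⟩ := List.mem_map.1 hx
        rw [← hrel w']
        positivity
      have h0 := all_zero_of_sum_zero _ hnn (by simpa using hsum) _ hmem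
      have h1 := hrel w
      omega
    have hall : word.all (fun w => (exist.getD w []).length == 0) = true := by
      simp only [List.all_eq_true, beq_iff_eq]
      exact hz
    simp [Place, hall, levels]
  | succ j ih =>
    intro k visit exist rem hjk hvl hkeys hrel hsum
    have hkm : k < word.length := by omega
    have hks : k < slice.length := by omega
    -- the base branch is not taken: some letter still has occurrences left
    have hallf : word.all (fun w => (exist.getD w []).length == 0) = false := by
      by_contra hc
      rw [Bool.not_eq_false, List.all_eq_true] at hc
      have : ((PySem.Set.ofList word).map (fun w => rem.getD w 0)).sum = 0 := by
        apply List.sum_eq_zero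
        intro x hx
        obtain ⟨w, hw, rfl⟩ := List.mem_map.1 hx
        have hw' : w ∈ word := (PySem.Set.mem_ofList word w).1 hw
        have := hc w hw'
        simp only [beq_iff_eq] at this
        have := hrel w
        omega
      omega
    set row : List String := slice.getD k [] with hrowdef
    have hrowmem : row ∈ slice := by
      rw [hrowdef, List.getD_eq_getElem slice [] hks]
      exact List.getElem_mem hks
    have hncols : (slice.getD 0 []).length = row.length := (hrect row hrowmem).symm
    set used : List Nat := visit.take k with husdef
    -- unfold one Place step and flatten the accumulator
    have hlhs : Place (j + 1 + 1) word slice visit exist k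
        = ((List.range row.length).map (fun col =>
            if check visit k col = true then
              if exist.contains (row.getD col "") = true then
                if (exist.getD (row.getD col "") []).length ≠ 0 then
                  Place (j + 1) word slice (visit.set k col)
                    (exist.insert (row.getD col "") (exist.getD (row.getD col "") []).dropLast)
                    (k + 1)
                else 0
              else 0
            else 0)).sum := by
      conv_lhs => rw [Place]
      simp only [hallf, Bool.false_eq_true, if_false, hncols, ← hrowdef]
      have hbody : ∀ (cnt : Int) (col : Nat),
          (if check visit k col = true then
            if exist.contains (row.getD col "") = true then
              if (exist.getD (row.getD col "") []).length ≠ 0 then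
                cnt + Place (j + 1) word slice (visit.set k col)
                  (exist.insert (row.getD col "") (exist.getD (row.getD col "") []).dropLast)
                  (k + 1)
              else cnt
            else cnt
          else cnt)
          = cnt + (if check visit k col = true then
              if exist.contains (row.getD col "") = true then
                if (exist.getD (row.getD col "") []).length ≠ 0 then
                  Place (j + 1) word slice (visit.set k col)
                    (exist.insert (row.getD col "") (exist.getD (row.getD col "") []).dropLast)
                    (k + 1)
                else 0
              else 0
            else 0) := by
        intro cnt col
        split_ifs <;> simp
      calc (List.range row.length).foldl (fun cnt col =>
              if check visit k col = true then
                if exist.contains (row.getD col "") = true then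
                  if (exist.getD (row.getD col "") []).length ≠ 0 then
                    cnt + Place (j + 1) word slice (visit.set k col)
                      (exist.insert (row.getD col "") (exist.getD (row.getD col "") []).dropLast)
                      (k + 1)
                  else cnt
                else cnt
              else cnt) 0
          = (List.range row.length).foldl (fun cnt col => cnt + (if check visit k col = true then
              if exist.contains (row.getD col "") = true then
                if (exist.getD (row.getD col "") []).length ≠ 0 then
                  Place (j + 1) word slice (visit.set k col)
                    (exist.insert (row.getD col "") (exist.getD (row.getD col "") []).dropLast)
                    (k + 1)
                else 0
              else 0
            else 0)) 0 := by
            apply PySem.List.foldl_congr_mem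
            intro acc x _
            exact hbody acc x
        _ = _ := by rw [PySem.List.foldl_add]; simp
    rw [hlhs]
    -- RHS: peel one level of the BFS
    have hdrop : slice.drop k = row :: slice.drop (k + 1) := by
      rw [List.drop_eq_getElem_cons hks, hrowdef, List.getD_eq_getElem slice [] hks]
    rw [hdrop, List.take_succ_cons, levels_cons_singleton, Nat.cast_list_sum, List.map_map]
    rw [show stepB row (used, rem) = (List.range row.length).filterMap (fun c =>
        if c ∉ used ∧ rem.getD (row.getD c "") 0 > 0 then
          some (used ++ [c], rem.insert (row.getD c "") (rem.getD (row.getD c "") 0 - 1))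
        else none) from rfl]
    rw [sum_map_filterMap]
    apply congrArg List.sum
    apply List.map_congr_left
    intro col hcolmem
    have hcol : col < row.length := List.mem_range.1 hcolmem
    have hkle : k ≤ visit.length := by omega
    have hkvl : k < visit.length := by omega
    by_cases hc1 : col ∈ used
    · -- column already used: both sides contribute 0
      have hch : ¬ check visit k col = true := by
        rw [check_iff visit k col hkle, ← husdef]
        simp [hc1]
      have hB : ¬ (col ∉ used ∧ rem.getD (row.getD col "") 0 > 0) := fun h => h.1 hc1
      rw [if_neg hch, if_neg hB]
    · by_cases hc2 : rem.getD (row.getD col "") 0 > 0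
      · -- live branch on both sides
        have hch : check visit k col = true := by
          rw [check_iff visit k col hkle, ← husdef]; exact hc1
        have hcont : exist.contains (row.getD col "") = true := by
          cases hcontc : exist.contains (row.getD col "")
          · have h0 : exist.getD (row.getD col "") [] = [] :=
              PySem.Dict.getD_of_not_contains _ _ hcontc
            have h2 := hrel (row.getD col "")
            rw [h0] at h2
            simp only [List.length_nil, Nat.cast_zero] at h2
            omega
          · rfl
        have hlenpos : 0 < (exist.getD (row.getD col "") []).length := by
          have := hrel (row.getD col ""); omega
        have hkmem : (row.getD col "") ∈ PySem.Set.ofList word := by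
          rw [← hkeys]
          exact (PySem.Dict.contains_iff_mem_keys exist (row.getD col "")).1 hcont
        rw [if_pos hch, if_pos hcont, if_pos (by omega), if_pos ⟨hc1, hc2⟩]
        have hrec := ih (k + 1) (visit.set k col)
          (exist.insert (row.getD col "") (exist.getD (row.getD col "") []).dropLast)
          (rem.insert (row.getD col "") (rem.getD (row.getD col "") 0 - 1))
          (by omega) (by simp [hvl])
          ((PySem.Dict.keys_insert_of_contains _ _ hcont).trans hkeys)
          (by
            intro w
            by_cases hw : w = row.getD col ""
            · subst hw
              rw [PySem.Dict.getD_insert_self, PySem.Dict.getD_insert_self, List.length_dropLast]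
              have := hrel (row.getD col "")
              omega
            · simp only [PySem.Dict.getD_insert, if_neg hw]
              exact hrel w)
          (by
            rw [sum_getD_insert _ (PySem.Set.nodup_ofList word) rem _ _ hkmem, hsum]
            push_cast
            ring)
        rw [hrec, take_set_succ visit k col hkvl, ← husdef]
        simp
      · -- no occurrence of this letter left: both sides contribute 0
        have hB : ¬ (col ∉ used ∧ rem.getD (row.getD col "") 0 > 0) := fun h => hc2 h.2
        rw [if_neg hB]
        by_cases hch : check visit k col = true
        · rw [if_pos hch]
          have hlen0 : (exist.getD (row.getD col "") []).length = 0 := by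
            have := hrel (row.getD col ""); omega
          by_cases hcont : exist.contains (row.getD col "") = true
          · rw [if_pos hcont, if_neg (by omega)]
          · rw [if_neg hcont]
        · rw [if_neg hch]

-- the exist-building loop groups the enumerated indices by letter
lemma getD_exist_fold (l : List (Int × String)) (d : PySem.Dict String (List Int)) (w : String) :
    (l.foldl (fun d p => d.insert p.2 (d.getD p.2 [] ++ [p.1])) d).getD w []
      = d.getD w [] ++ (l.filter (fun p => p.2 == w)).map (·.1) := by
  induction l generalizing d with
  | nil => simp
  | cons p l ih =>
    rw [List.foldl_cons, ih, PySem.Dict.getD_insert]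
    by_cases hw : w = p.2
    · rw [if_pos hw, List.filter_cons_of_pos (by simp [hw])]
      simp [hw]
    · rw [if_neg hw, List.filter_cons_of_neg (by simp; intro h; exact hw h.symm)]

lemma length_filter_snd_enumerate (word : List String) : ∀ (s : Int) (w : String),
    ((PySem.List.enumerate word s).filter (fun p => p.2 == w)).length = word.count w := by
  induction word with
  | nil => intro s w; simp [PySem.List.enumerate_nil]
  | cons x word ih =>
    intro s w
    rw [PySem.List.enumerate_cons]
    by_cases hx : x = w
    · rw [List.filter_cons_of_pos (by simp [hx]), List.length_cons, ih, List.count_cons]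
      simp [hx]
    · rw [List.filter_cons_of_neg (by simp [hx]), ih, List.count_cons]
      simp [hx]

-- summing the multiplicities of the distinct letters gives the word length
lemma sum_count_ofList (l : List String) :
    ((PySem.Set.ofList l).map (fun w => l.count w)).sum = l.length := by
  have hperm : (PySem.Set.ofList l).Perm l.dedup := by
    apply List.perm_of_nodup_nodup_toFinset_eq (PySem.Set.nodup_ofList l) (List.nodup_dedup l)
    ext x
    simp [PySem.Set.mem_ofList]
  calc ((PySem.Set.ofList l).map (fun w => l.count w)).sum
      = (l.dedup.map (fun w => l.count w)).sum := (hperm.map _).sum_eq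
    _ = l.length := List.sum_map_count_dedup_eq_length l

theorem solution_spec : Claim_equal_solution := by
  unfold Claim_equal_solution
  intro word cards _hdom hpre
  unfold Spec_solution solution solution_alt
  simp only [PySem.List.len_eq]
  rcases hpre with hw0 | hshort | hpre
  · -- empty word: every offset contributes 1 on both sides
    subst hw0
    apply PySem.List.foldl_congr_mem
    intro acc off _
    simp [Place]
  · -- word longer than cards: the offset range is empty on both sides
    rw [PySem.List.pyRange_one_eq_nil (by omega)]
    rfl
  · apply PySem.List.foldl_congr_mem
    intro acc off hoff
    rw [PySem.List.mem_pyRange_one] at hoff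
    obtain ⟨hoff0, hoffub⟩ := hoff
    congr 1
    rw [PySem.List.slice_from cards hoff0]
    set t := off.toNat with htdef
    have htub : t + word.length ≤ cards.length := by omega
    set slice := cards.drop t with hslicedef
    have hslen : slice.length = cards.length - t := by simp [hslicedef]
    have hms : word.length ≤ slice.length := by omega
    have hrect : ∀ r ∈ slice, r.length = (slice.getD 0 []).length := by
      intro r hr
      have hne : slice ≠ [] := List.ne_nil_of_mem hr
      have hlen0 : 0 < slice.length := List.length_pos_of_ne_nil hne
      have h0mem : slice.getD 0 [] ∈ slice := by
        rw [List.getD_eq_getElem slice [] hlen0]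
        exact List.getElem_mem hlen0
      rw [hpre r (List.mem_of_mem_drop hr), hpre _ (List.mem_of_mem_drop h0mem)]
    set exist0 := (PySem.List.enumerate word 0).foldl
        (fun d p => d.insert p.2 (d.getD p.2 [] ++ [p.1])) PySem.Dict.empty with hexdef
    set need0 := word.foldl (fun d w => d.insert w (d.getD w 0 + 1))
        (PySem.Dict.empty : PySem.Dict String Int) with hneeddef
    have hlen : ∀ w, (exist0.getD w []).length = word.count w := by
      intro w
      rw [hexdef, getD_exist_fold, PySem.Dict.getD_empty]
      simp [length_filter_snd_enumerate word 0 w]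
    have hneedD : ∀ w, need0.getD w 0 = (word.count w : Int) := by
      intro w
      rw [hneeddef, PySem.Dict.getD_foldl_insert_add_one, PySem.Dict.getD_empty]
      simp
    have hkeys : exist0.keys = PySem.Set.ofList word := by
      rw [hexdef]
      rw [PySem.Dict.keys_foldl_insert_key (PySem.List.enumerate word 0)
            (fun p : Int × String => p.2) (fun d p => d.getD p.2 [] ++ [p.1]) PySem.Dict.empty,
          PySem.List.map_snd_enumerate]
      simp [PySem.Set.update_nil_left]
    have hrel : ∀ w, ((exist0.getD w []).length : Int) = need0.getD w 0 := by
      intro w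
      rw [hlen w, hneedD w]
    have hsum : ((PySem.Set.ofList word).map (fun w => need0.getD w 0)).sum
        = (word.length : Int) := by
      have hmc : (PySem.Set.ofList word).map (fun w => need0.getD w 0)
          = (PySem.Set.ofList word).map (fun w => ((word.count w : Nat) : Int)) :=
        List.map_congr_left (fun w _ => hneedD w)
      have hcast : ((PySem.Set.ofList word).map (fun w => ((word.count w : Nat) : Int))).sum
          = ((((PySem.Set.ofList word).map (fun w => word.count w)).sum : Nat) : Int) := by
        rw [Nat.cast_list_sum, List.map_map]
        rfl
      rw [hmc, hcast, sum_count_ofList]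
    have hA := place_eq word slice hrect hms word.length 0
        (List.replicate slice.length 0) exist0 need0 (by omega) (by simp)
        hkeys hrel hsum
    simp only [List.drop_zero, List.take_zero] at hA
    have hB := foldl_stepB_eq_levels cards word.length t [([], need0)] htub
    rw [hA, hB]
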